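-- pv_equiv track=rewrite | github.com/yangpuhai/CSG | SpanPtr/utils/utils_multiWOZ_DST.py | seq2extend_ids
-- ===== SOURCE A (Python) =====
-- def seq2extend_ids(lis, word2idx):
--     ids = []
--     oovs = []
--     oovs_word2idx={}
--     for w in lis:
--         if w in word2idx:
--             ids.append(word2idx[w])
--         else:
--             if w not in oovs:
--                 oovs.append(w)
--             oov_num = oovs.index(w)
--             ids.append(len(word2idx) + oov_num)
--             oovs_word2idx[w]=len(word2idx) + oov_num
--     oovs_word2idx.update(word2idx)
--     return ids, oovs, oovs_word2idx
-- ===== SOURCE B (Python) =====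
-- def seq2extend_ids(lis, word2idx):
--     # pass 1: collect OOV words in first-appearance order (seen-set avoids list scans)
--     oovs = []
--     seen = set()
--     for w in lis:
--         if w not in word2idx and w not in seen:
--             seen.add(w)
--             oovs.append(w)
--     base = len(word2idx)
--     oovs_word2idx = {w: base + i for i, w in enumerate(oovs)}
--     # pass 2: ids via O(1) table lookups
--     ids = [word2idx[w] if w in word2idx else oovs_word2idx[w] for w in lis]
--     oovs_word2idx.update(word2idx)
--     return ids, oovs, oovs_word2idx
-- ===== Notes on version B (the rewrite author's own statement) =====
-- stated objective: faster
-- what changed: A's single loop with linear oovs membership tests and oovs.index scans is replaced by two passes: a first pass collects OOV words with a seen-set (no list scans), then an enumerate-built OOV id table makes the second pass produce ids by O(1) dict lookups.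
import Mathlib
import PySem

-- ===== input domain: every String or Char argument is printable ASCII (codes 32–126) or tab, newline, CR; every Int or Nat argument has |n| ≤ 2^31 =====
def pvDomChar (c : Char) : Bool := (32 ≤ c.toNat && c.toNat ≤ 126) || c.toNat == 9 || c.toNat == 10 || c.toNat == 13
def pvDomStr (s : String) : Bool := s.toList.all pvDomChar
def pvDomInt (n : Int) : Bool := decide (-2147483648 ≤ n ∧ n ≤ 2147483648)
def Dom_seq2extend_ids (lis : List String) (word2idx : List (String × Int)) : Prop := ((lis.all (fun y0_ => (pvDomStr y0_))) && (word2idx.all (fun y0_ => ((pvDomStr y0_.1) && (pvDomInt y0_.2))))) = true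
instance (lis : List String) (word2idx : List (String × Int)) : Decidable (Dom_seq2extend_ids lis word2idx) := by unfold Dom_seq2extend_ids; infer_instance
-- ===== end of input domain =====

-- B replaces A's one loop (linear `w in oovs` tests and `oovs.index` scans) by two passes:
-- collect the OOV list with a seen-set, build the OOV id table once, then map tokens to ids.

-- ===== PORT A =====
-- loop body of A: state = (ids, oovs, oovs_word2idx)
def aStep (d : PySem.Dict String Int) (st : List Int × List String × PySem.Dict String Int)
    (w : String) : List Int × List String × PySem.Dict String Int :=
  if d.contains w then
    -- `word2idx[w]`: guarded by `w in word2idx`, so the default of getD is unreachable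
    (st.1 ++ [d.getD w 0], st.2.1, st.2.2)
  else
    let oovs' := if st.2.1.contains w then st.2.1 else st.2.1 ++ [w]
    -- `oovs.index(w)`: w was just ensured to be in oovs', so index? is some
    let num : Int := (((PySem.List.index? oovs' w).getD 0 : Nat) : Int)
    (st.1 ++ [(d.size : Int) + num], oovs', st.2.2.insert w ((d.size : Int) + num))

def seq2extend_ids (lis : List String) (word2idx : List (String × Int)) : List Int × List String × (List (String × Int)) :=
  let d := PySem.Dict.ofList word2idx
  let st := lis.foldl (aStep d) ([], [], PySem.Dict.empty)
  (st.1, st.2.1, (st.2.2.update d.items).items)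

-- ===== PORT B =====
-- pass 1 loop body: state = (oovs, seen)
def bStep (d : PySem.Dict String Int) (st : List String × PySem.Set String)
    (w : String) : List String × PySem.Set String :=
  if d.contains w || PySem.Set.contains st.2 w then st
  else (st.1 ++ [w], PySem.Set.add st.2 w)

-- the dict comprehension {w: base + i for i, w in enumerate(oovs)}
def bTable (base : Int) (oovs : List String) : PySem.Dict String Int :=
  PySem.Dict.ofList ((PySem.List.enumerate oovs).map (fun p => (p.2, base + p.1)))

def seq2extend_ids_alt (lis : List String) (word2idx : List (String × Int)) : List Int × List String × (List (String × Int)) :=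
  let d := PySem.Dict.ofList word2idx
  let oovs := (lis.foldl (bStep d) ([], PySem.Set.empty)).1
  let table := bTable (d.size : Int) oovs
  let ids := lis.map (fun w => match d.get? w with | some v => v | none => table.getD w 0)
  (ids, oovs, (table.update d.items).items)

-- ===== PRECONDITION & SPEC =====
def Spec_seq2extend_ids (lis : List String) (word2idx : List (String × Int)) (out : List Int × List String × (List (String × Int))) : Prop := out = seq2extend_ids_alt lis word2idx
instance (lis : List String) (word2idx : List (String × Int)) (out : List Int × List String × (List (String × Int))) : Decidable (Spec_seq2extend_ids lis word2idx out) := by unfold Spec_seq2extend_ids; infer_instance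

-- ===== CLAIM (what is proved, stated in full; the proofs are below) =====
def Claim_equal_seq2extend_ids : Prop := ∀ (lis : List String) (word2idx : List (String × Int)), Dom_seq2extend_ids lis word2idx → Spec_seq2extend_ids lis word2idx (seq2extend_ids lis word2idx)

-- ===== LEMMAS AND PROOFS =====

-- the pure oovs-collecting fold (pass 1 of B without the seen-set)
def collect (d : PySem.Dict String Int) (o : List String) (ws : List String) : List String :=
  ws.foldl (fun acc w => if d.contains w || acc.contains w then acc else acc ++ [w]) o

theorem collect_nil (d : PySem.Dict String Int) (o : List String) : collect d o [] = o := rfl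

theorem collect_cons (d : PySem.Dict String Int) (o : List String) (w : String) (ws : List String) :
    collect d o (w :: ws) = collect d (if d.contains w || o.contains w then o else o ++ [w]) ws := rfl

-- B's pass-1 pair fold projects to `collect` when seen = oovs (as a set of distinct elements)
theorem nodup_snoc {α : Type} (l : List α) (w : α) (h : l.Nodup) (hw : w ∉ l) :
    (l ++ [w]).Nodup := by
  rw [List.nodup_append]
  refine ⟨h, List.nodup_singleton w, ?_⟩
  intro a ha b hb e
  exact hw ((List.mem_singleton.mp hb) ▸ (e ▸ ha))

theorem bStep_fold_eq_collect (d : PySem.Dict String Int) :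
    ∀ (ws : List String) (o : List String), o.Nodup →
      ws.foldl (bStep d) (o, o) = (collect d o ws, collect d o ws)
  | [], o, _ => rfl
  | w :: ws, o, h => by
    rw [List.foldl_cons, collect_cons]
    by_cases hc : (d.contains w || o.contains w) = true
    · have hb : bStep d (o, o) w = (o, o) := by
        simp only [bStep, PySem.Set.contains_eq_listContains, hc, if_true]
      rw [hb, if_pos hc]
      exact bStep_fold_eq_collect d ws o h
    · have hw : w ∉ o := by
        simp only [Bool.or_eq_true, not_or] at hc
        simpa using hc.2
      have hc' : (d.contains w || PySem.Set.contains o w) = false := by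
        simpa [PySem.Set.contains_eq_listContains] using hc
      have hb : bStep d (o, o) w = (o ++ [w], o ++ [w]) := by
        simp only [bStep, hc', Bool.false_eq_true, if_false]
        rw [PySem.Set.add_of_not_mem hw]
      rw [hb, if_neg hc]
      exact bStep_fold_eq_collect d ws (o ++ [w]) (nodup_snoc o w h hw)

theorem collect_nodup (d : PySem.Dict String Int) :
    ∀ (ws : List String) (o : List String), o.Nodup → (collect d o ws).Nodup
  | [], o, h => h
  | w :: ws, o, h => by
    rw [collect_cons]
    by_cases hc : (d.contains w || o.contains w) = true
    · rw [if_pos hc]; exact collect_nodup d ws o h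
    · rw [if_neg hc]
      have hw : w ∉ o := by
        simp only [Bool.or_eq_true, not_or] at hc
        simpa using hc.2
      exact collect_nodup d ws (o ++ [w]) (nodup_snoc o w h hw)

theorem collect_extends (d : PySem.Dict String Int) :
    ∀ (ws : List String) (o : List String), ∃ ext, collect d o ws = o ++ ext
  | [], o => ⟨[], by simp [collect_nil]⟩
  | w :: ws, o => by
    rw [collect_cons]
    by_cases hc : (d.contains w || o.contains w) = true
    · rw [if_pos hc]; exact collect_extends d ws o
    · rw [if_neg hc]
      obtain ⟨ext, he⟩ := collect_extends d ws (o ++ [w])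
      exact ⟨w :: ext, by simp [he]⟩

theorem bTable_items (base : Int) (o : List String) (h : o.Nodup) :
    (bTable base o).items = (PySem.List.enumerate o).map (fun p => (p.2, base + p.1)) := by
  show (PySem.Dict.empty.update ((PySem.List.enumerate o).map (fun p => (p.2, base + p.1)))).items = _
  unfold PySem.Dict.update
  rw [List.foldl_map]
  rw [PySem.Dict.items_foldl_insert_fresh (PySem.List.enumerate o) (fun p => p.2)
        (fun p => base + p.1) PySem.Dict.empty (by intro a _; simp [PySem.Dict.contains_empty])
        (by rw [PySem.List.map_snd_enumerate]; exact h)]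
  rfl

theorem bTable_keys (base : Int) (o : List String) (h : o.Nodup) :
    (bTable base o).keys = o := by
  show ((bTable base o).items).map (fun p => p.1) = o
  rw [bTable_items base o h, List.map_map]
  exact PySem.List.map_snd_enumerate o 0

theorem bTable_get? (base : Int) (o : List String) (h : o.Nodup) (w : String) (k : Nat)
    (hk : PySem.List.index? o w = some k) :
    (bTable base o).get? w = some (base + (k : Int)) := by
  obtain ⟨hkl, hget, -⟩ := PySem.List.getElem_of_index?_eq_some hk
  apply PySem.Dict.get?_of_mem_items
  · rw [bTable_items base o h]
    refine List.mem_map.mpr ⟨((k : Int), w), ?_, rfl⟩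
    rw [PySem.List.mem_enumerate_iff]
    exact ⟨k, hkl, by simp [hget]⟩
  · rw [bTable_keys base o h]; exact h

theorem dict_insert_self {κ ν : Type} [BEq κ] [LawfulBEq κ] (d : PySem.Dict κ ν) (k : κ) (v : ν)
    (hnd : d.keys.Nodup) (h : d.get? k = some v) : d.insert k v = d := by
  have hc : d.contains k = true := by rw [PySem.Dict.contains_eq_isSome_get?, h]; rfl
  apply PySem.Dict.ext
  rw [PySem.Dict.items_insert_of_contains d v hc]
  conv_rhs => rw [← List.map_id d.items]
  apply List.map_congr_left
  intro p hp
  by_cases hpk : (p.1 == k) = true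
  · have hk1 : p.1 = k := by simpa using hpk
    have : d.get? p.1 = some p.2 := by
      have : (p.1, p.2) ∈ d.items := by simpa using hp
      exact PySem.Dict.get?_of_mem_items d this hnd
    rw [hk1, h] at this
    simp only [if_pos hpk, id]
    have : p.2 = v := by injection this.symm
    cases p
    simp_all
  · simp [hpk]

theorem bTable_append (base : Int) (o : List String) (w : String) :
    (bTable base o).insert w (base + (o.length : Int)) = bTable base (o ++ [w]) := by
  show _ = PySem.Dict.empty.update _
  rw [PySem.List.enumerate_append o [w] 0]
  have h1 : PySem.List.enumerate [w] (0 + (o.length : Int)) = [((o.length : Int), w)] := by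
    simp [PySem.List.enumerate]
  rw [h1, List.map_append]
  unfold PySem.Dict.update
  rw [List.foldl_append]
  rfl

theorem main_fold (d : PySem.Dict String Int) :
    ∀ (ws : List String) (ids0 : List Int) (o : List String), o.Nodup →
      ws.foldl (aStep d) (ids0, o, bTable (d.size : Int) o) =
        (ids0 ++ ws.map (fun w => match d.get? w with
            | some v => v
            | none => (bTable (d.size : Int) (collect d o ws)).getD w 0),
         collect d o ws, bTable (d.size : Int) (collect d o ws))
  | [], ids0, o, _ => by simp [collect_nil]
  | w :: ws, ids0, o, h => by
    rw [List.foldl_cons, collect_cons]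
    by_cases hdc : d.contains w = true
    · obtain ⟨v, hv⟩ : ∃ v, d.get? w = some v := by
        have := PySem.Dict.contains_eq_isSome_get? d w
        rw [hdc] at this
        exact Option.isSome_iff_exists.mp this.symm
      have hstep : aStep d (ids0, o, bTable (d.size : Int) o) w =
          (ids0 ++ [v], o, bTable (d.size : Int) o) := by
        simp only [aStep, hdc, if_true, PySem.Dict.getD_of_get?_eq_some d 0 hv]
      have hcol : (if d.contains w || o.contains w then o else o ++ [w]) = o := by
        simp [hdc]
      rw [hstep, main_fold d ws (ids0 ++ [v]) o h, hcol]
      simp [hv, List.append_assoc]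
    · have hget : d.get? w = none := (PySem.Dict.get?_eq_none_iff_contains d w).mpr
        (by simpa using hdc)
      by_cases hwo : w ∈ o
      · -- repeated OOV word: oovs unchanged, re-insert of the same binding
        obtain ⟨k, hk⟩ : ∃ k, PySem.List.index? o w = some k := by
          have := (PySem.List.index?_isSome_iff o w).mpr hwo
          exact Option.isSome_iff_exists.mp this
        have hoc : o.contains w = true := by simpa using hwo
        have hstep : aStep d (ids0, o, bTable (d.size : Int) o) w =
            (ids0 ++ [(d.size : Int) + (k : Int)], o, bTable (d.size : Int) o) := by
          have hdc' : d.contains w = false := by simpa using hdc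
          simp only [aStep, hdc', Bool.false_eq_true, if_false, hoc, if_true, hk, Option.getD_some]
          rw [dict_insert_self _ _ _ (by rw [bTable_keys _ _ h]; exact h)
              (bTable_get? (d.size : Int) o h w k hk)]
        have hdc' : d.contains w = false := by simpa using hdc
        have hcol : (if d.contains w || o.contains w then o else o ++ [w]) = o := by
          simp [hdc', hwo]
        rw [hstep, main_fold d ws (ids0 ++ [(d.size : Int) + (k : Int)]) o h, hcol]
        -- head of the map: lookup w in the final table
        have hlook : (bTable (d.size : Int) (collect d o ws)).getD w 0 =
            (d.size : Int) + (k : Int) := by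
          obtain ⟨ext, he⟩ := collect_extends d ws o
          have hidx : PySem.List.index? (collect d o ws) w = some k := by
            rw [he]; rw [PySem.List.index?_append_of_mem ext hwo]; exact hk
          exact PySem.Dict.getD_of_get?_eq_some _ 0
            (bTable_get? _ _ (collect_nodup d ws o h) w k hidx)
        simp [hget, hlook, List.append_assoc]
      · -- fresh OOV word: append to oovs, table grows by one binding
        have hoc : o.contains w = false := by simpa using hwo
        have hidx : PySem.List.index? (o ++ [w]) w = some o.length :=
          PySem.List.index?_append_singleton_self o w hwo
        have hstep : aStep d (ids0, o, bTable (d.size : Int) o) w =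
            (ids0 ++ [(d.size : Int) + (o.length : Int)], o ++ [w],
             bTable (d.size : Int) (o ++ [w])) := by
          have hdc' : d.contains w = false := by simpa using hdc
          simp only [aStep, hdc', Bool.false_eq_true, if_false, hoc, hidx, Option.getD_some]
          rw [bTable_append]
        have hdc' : d.contains w = false := by simpa using hdc
        have hcol : (if d.contains w || o.contains w then o else o ++ [w]) = o ++ [w] := by
          simp [hdc', hwo]
        have hnod : (o ++ [w]).Nodup := nodup_snoc o w h hwo
        rw [hstep, main_fold d ws (ids0 ++ [(d.size : Int) + (o.length : Int)]) (o ++ [w]) hnod,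
            hcol]
        have hlook : (bTable (d.size : Int) (collect d (o ++ [w]) ws)).getD w 0 =
            (d.size : Int) + (o.length : Int) := by
          obtain ⟨ext, he⟩ := collect_extends d ws (o ++ [w])
          have hidx2 : PySem.List.index? (collect d (o ++ [w]) ws) w = some o.length := by
            rw [he, PySem.List.index?_append_of_mem ext (by simp), hidx]
          exact PySem.Dict.getD_of_get?_eq_some _ 0
            (bTable_get? _ _ (collect_nodup d ws (o ++ [w]) hnod) w o.length hidx2)
        simp [hget, hlook, List.append_assoc]

-- ===== VERDICT (by name: the statement is the Claim_ definition above) =====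
theorem seq2extend_ids_spec : Claim_equal_seq2extend_ids := by
  intro lis word2idx _
  unfold Spec_seq2extend_ids
  show seq2extend_ids lis word2idx = seq2extend_ids_alt lis word2idx
  simp only [seq2extend_ids, seq2extend_ids_alt]
  have hempty : (PySem.Dict.empty : PySem.Dict String Int) =
      bTable ((PySem.Dict.ofList word2idx).size : Int) ([] : List String) := rfl
  have hB : (List.foldl (bStep (PySem.Dict.ofList word2idx)) ([], PySem.Set.empty) lis).1 =
      collect (PySem.Dict.ofList word2idx) [] lis := by
    rw [show (([], PySem.Set.empty) : List String × PySem.Set String)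
          = (([] : List String), ([] : List String)) from rfl,
        bStep_fold_eq_collect (PySem.Dict.ofList word2idx) lis [] List.nodup_nil]
  rw [hempty, main_fold (PySem.Dict.ofList word2idx) lis [] [] List.nodup_nil, hB]
  simp
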